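-- pv_equiv track=rewrite | github.com/Andrewnetwork/MathematicalInvestigations | ComputerVision/AutomataSeedlings/V3/graphHelpers.py | longestSublists
-- ===== SOURCE A (Python) =====
-- def longestSublists(lsts):
--     longest = []
--     subLists = []
--
--     for lst in lsts:
--         if (len(lst) > len(longest)):
--             longest = lst
--
--     for lst in lsts:
--         if(len(lst) == len(longest) ):
--             subLists.append(lst)
--
--     return subLists
-- ===== SOURCE B (Python) =====
-- def longestSublists(lsts):
--     maxLen = 0
--     result = []
--     for lst in lsts:
--         n = len(lst)
--         if n > maxLen:
--             maxLen = n
--             result = [lst]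
--         elif n == maxLen:
--             result.append(lst)
--     return result
-- ===== Notes on version B (the rewrite author's own statement) =====
-- stated objective: simpler
-- what changed: Replaces A's two passes (find the longest list, then rescan collecting equal-length lists) with a single pass that tracks the current maximum length and resets/extends the result as it goes.
import Mathlib
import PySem

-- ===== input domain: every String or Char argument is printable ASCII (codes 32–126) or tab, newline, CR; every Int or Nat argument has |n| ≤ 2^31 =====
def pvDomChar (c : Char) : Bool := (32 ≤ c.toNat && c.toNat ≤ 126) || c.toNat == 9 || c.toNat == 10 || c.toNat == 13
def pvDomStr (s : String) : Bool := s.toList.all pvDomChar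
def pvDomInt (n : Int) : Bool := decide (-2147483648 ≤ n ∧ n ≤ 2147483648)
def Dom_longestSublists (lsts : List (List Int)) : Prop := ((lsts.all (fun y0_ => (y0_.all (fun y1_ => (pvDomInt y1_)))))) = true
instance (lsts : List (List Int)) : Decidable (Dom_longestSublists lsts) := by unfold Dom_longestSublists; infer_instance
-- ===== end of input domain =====

-- B replaces A's two passes (find longest, then collect) with one pass tracking the max length; same return value.

-- ===== PORT A =====
def longestSublists (lsts : List (List Int)) : List (List Int) :=
  let longest := lsts.foldl
    (fun longest lst => if (lst.length : Int) > (longest.length : Int) then lst else longest)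
    ([] : List Int)
  lsts.foldl
    (fun subLists lst => if ((lst.length : Int) == (longest.length : Int)) then subLists ++ [lst] else subLists)
    []

-- ===== PORT B =====
def longestSublists_alt (lsts : List (List Int)) : List (List Int) :=
  (lsts.foldl
    (fun (st : Int × List (List Int)) lst =>
      let n : Int := lst.length
      if n > st.1 then (n, [lst])
      else if n == st.1 then (st.1, st.2 ++ [lst])
      else st)
    ((0 : Int), ([] : List (List Int)))).2

-- ===== PRECONDITION & SPEC =====
def Spec_longestSublists (lsts : List (List Int)) (out : List (List Int)) : Prop := out = longestSublists_alt lsts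
instance (lsts : List (List Int)) (out : List (List Int)) : Decidable (Spec_longestSublists lsts out) := by unfold Spec_longestSublists; infer_instance

-- ===== CLAIM (what is proved, stated in full; the proofs are below) =====
def Claim_equal_longestSublists : Prop := ∀ (lsts : List (List Int)), Dom_longestSublists lsts → Spec_longestSublists lsts (longestSublists lsts)

-- ===== LEMMAS AND PROOFS =====

-- running maximum of the lengths, the quantity both programs are really about
def pvMaxLen (lsts : List (List Int)) (m : Int) : Int :=
  lsts.foldl (fun a x => max a (x.length : Int)) m

lemma le_pvMaxLen (lsts : List (List Int)) (m : Int) : m ≤ pvMaxLen lsts m := by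
  induction lsts generalizing m with
  | nil => simp [pvMaxLen]
  | cons x rest ih =>
    calc m ≤ max m (x.length : Int) := le_max_left _ _
      _ ≤ pvMaxLen rest (max m (x.length : Int)) := ih _
      _ = pvMaxLen (x :: rest) m := rfl

-- A's first pass keeps a list whose length is the running maximum
lemma lenA (lsts : List (List Int)) (l : List Int) :
    ((lsts.foldl
      (fun longest lst => if (lst.length : Int) > (longest.length : Int) then lst else longest)
      l).length : Int) = pvMaxLen lsts (l.length : Int) := by
  induction lsts generalizing l with
  | nil => simp [pvMaxLen]
  | cons x rest ih =>
    simp only [List.foldl_cons, pvMaxLen, gt_iff_lt]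
    split_ifs with h
    · rw [ih x]; congr 1; omega
    · rw [ih l]; congr 1; omega

-- B's single pass: invariant relating its state to the running maximum and a filter
lemma foldB (lsts : List (List Int)) (m : Int) (acc : List (List Int)) :
    lsts.foldl
      (fun (st : Int × List (List Int)) lst =>
        let n : Int := lst.length
        if n > st.1 then (n, [lst])
        else if n == st.1 then (st.1, st.2 ++ [lst])
        else st)
      (m, acc)
    = (pvMaxLen lsts m,
       (if pvMaxLen lsts m = m then acc else []) ++
         lsts.filter (fun x => ((x.length : Int) == pvMaxLen lsts m))) := by
  induction lsts generalizing m acc with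
  | nil => simp [pvMaxLen]
  | cons x rest ih =>
    have hM : pvMaxLen (x :: rest) m = pvMaxLen rest (max m (x.length : Int)) := rfl
    simp only [List.foldl_cons, List.filter_cons]
    by_cases h1 : (x.length : Int) > m
    · have hmax : max m (x.length : Int) = (x.length : Int) := by omega
      have hgt : pvMaxLen rest ((x.length : Int)) ≠ m := by
        have := le_pvMaxLen rest ((x.length : Int))
        omega
      rw [if_pos h1, ih, hM, hmax, if_neg hgt]
      have hle := le_pvMaxLen rest ((x.length : Int))
      by_cases h2 : (x.length : Int) = pvMaxLen rest ((x.length : Int))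
      · have e : pvMaxLen rest ((x.length : Int)) = (x.length : Int) := h2.symm
        simp [e]
      · have hb : ¬ ((x.length : Int) == pvMaxLen rest ((x.length : Int))) = true := by
          simpa using h2
        have h2' : ¬ pvMaxLen rest ((x.length : Int)) = (x.length : Int) := fun e => h2 e.symm
        simp [hb, h2']
    · have hmax : max m (x.length : Int) = m := by omega
      rw [hM, hmax]
      rw [if_neg h1]
      by_cases h2 : (x.length : Int) = m
      · have : ((x.length : Int) == m) = true := by simpa using h2
        rw [if_pos this, ih]
        by_cases h3 : pvMaxLen rest m = m
        · have : ((x.length : Int) == pvMaxLen rest m) = true := by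
            simp [h2, h3]
          simp [h2, h3]
        · have : ¬ ((x.length : Int) == pvMaxLen rest m) = true := by
            have := le_pvMaxLen rest m
            simp only [beq_iff_eq]; omega
          simp [h3, this]
      · have : ¬ ((x.length : Int) == m) = true := by simpa using h2
        rw [if_neg this, ih]
        have hne : ¬ ((x.length : Int) == pvMaxLen rest m) = true := by
          have := le_pvMaxLen rest m
          simp only [beq_iff_eq]; omega
        simp [hne]

-- A's second pass is a filter
lemma foldA2 (lsts : List (List Int)) (M : Int) (acc : List (List Int)) :
    lsts.foldl
      (fun subLists lst => if ((lst.length : Int) == M) then subLists ++ [lst] else subLists)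
      acc
    = acc ++ lsts.filter (fun x => ((x.length : Int) == M)) := by
  induction lsts generalizing acc with
  | nil => simp
  | cons x rest ih =>
    simp only [List.foldl_cons, List.filter_cons]
    split_ifs with h
    · rw [ih]; simp
    · rw [ih]

-- ===== VERDICT (by name: the statement is the Claim_ definition above) =====
theorem longestSublists_spec : Claim_equal_longestSublists := by
  intro lsts _
  unfold Spec_longestSublists longestSublists longestSublists_alt
  rw [foldB lsts 0 []]
  simp only [foldA2, lenA, List.nil_append]
  have : ((([] : List Int).length : Int)) = 0 := rfl
  rw [this]
  split_ifs <;> simp
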